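-- pv_equiv track=rewrite | github.com/tzorca/race-result-normalizer | processors/result_parser.py | filter_to_result_lines
-- ===== SOURCE A (Python) =====
-- def filter_to_result_lines(header_lines, raw_data, invert: bool):
--     lines = raw_data.splitlines(True)
--     good_lengths = list(map(len, header_lines))
--
--     result_lines = []
--
--     past_header = False
--
--     for line in lines:
--         # Skip header lines (Even when inverting)
--         if any(line == header for header in header_lines):
--             past_header = True
--             continue
--
--         # Don't claim lines as results until after the header
--         if not invert and not past_header:
--             continue
--
--         # Skip lines whose length doesn't equal the header line's length
--         if any(len(line) == good_length for good_length in good_lengths) == invert: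
--             continue
--
--         result_lines.append(line)
--
--     return result_lines
-- ===== SOURCE B (Python) =====
-- def filter_to_result_lines(header_lines, raw_data, invert: bool):
--     lines = raw_data.splitlines(True)
--     headers = set(header_lines)
--     good_lens = {len(h) for h in header_lines}
--     buckets = {}
--     for i, line in enumerate(lines):
--         if line in headers:
--             continue
--         buckets.setdefault(len(line), []).append((i, line))
--     start = -1 if invert else next(
--         (i for i, line in enumerate(lines) if line in headers), len(lines))
--     picked = []
--     for length, group in buckets.items():
--         if (length in good_lens) != invert:
--             picked.extend(p for p in group if p[0] > start)
--     picked.sort(key=lambda p: p[0])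
--     return [line for _, line in picked]
-- ===== Notes on version B (the rewrite author's own statement) =====
-- stated objective: alternative
-- what changed: Replaces A's single stateful scan (past_header flag, per-line linear scans of the header list) by a group-by algorithm: bucket non-header lines into a dict keyed by line length, select buckets by the invert condition, drop indices at or before the first header, and restore line order with a sort by index.
import Mathlib
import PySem

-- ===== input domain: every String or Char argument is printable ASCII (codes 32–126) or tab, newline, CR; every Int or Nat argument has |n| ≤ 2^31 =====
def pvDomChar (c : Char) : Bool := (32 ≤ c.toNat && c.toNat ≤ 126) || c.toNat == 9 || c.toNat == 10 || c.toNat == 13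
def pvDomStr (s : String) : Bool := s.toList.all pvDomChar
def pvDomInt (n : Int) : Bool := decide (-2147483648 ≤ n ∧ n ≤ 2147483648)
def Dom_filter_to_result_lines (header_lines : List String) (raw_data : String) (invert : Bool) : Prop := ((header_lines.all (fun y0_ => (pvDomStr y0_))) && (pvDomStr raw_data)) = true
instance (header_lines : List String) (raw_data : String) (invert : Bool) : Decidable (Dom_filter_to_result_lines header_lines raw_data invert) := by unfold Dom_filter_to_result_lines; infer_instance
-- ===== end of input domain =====

-- B replaces A's one-pass state machine (past_header flag) by a group-by-length
-- algorithm: bucket the non-header lines into a dict keyed by line length, pick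
-- the buckets whose length satisfies the invert condition, drop indices at or
-- before the first header, and re-order the survivors by index with a sort.
-- Objective: alternative (a different algorithm/data structure, similar cost).

-- shared hand-port of Python's str.splitlines(True) (keepends): exact on the
-- domain (printable ASCII + tab/newline/CR), where the only line boundaries
-- are '\n', '\r' and '\r\n'.
def pvSplitKeep : List Char → List Char → List (List Char)
  | acc, [] => if acc.isEmpty then [] else [acc.reverse]
  | acc, '\r' :: '\n' :: rest => (acc.reverse ++ ['\r', '\n']) :: pvSplitKeep [] rest
  | acc, c :: rest =>
      if c = '\n' ∨ c = '\r' then (acc.reverse ++ [c]) :: pvSplitKeep [] rest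
      else pvSplitKeep (c :: acc) rest

-- ===== PORT A =====
def filter_to_result_lines (header_lines : List String) (raw_data : String) (invert : Bool) : List String :=
  let lines := pvSplitKeep [] raw_data.toList
  let hdrs := header_lines.map String.toList
  let good_lengths := hdrs.map List.length
  let r := lines.foldl (fun (st : List (List Char) × Bool) line =>
      if hdrs.any (fun h => line == h) then (st.1, true)
      else if !invert && !st.2 then st
      else if (good_lengths.any (fun g => line.length == g)) == invert then st
      else (st.1 ++ [line], st.2)) ([], false)
  r.1.map String.mk

-- ===== PORT B =====
def filter_to_result_lines_alt (header_lines : List String) (raw_data : String) (invert : Bool) : List String :=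
  let lines := pvSplitKeep [] raw_data.toList
  let headers : PySem.Set (List Char) := PySem.Set.ofList (header_lines.map String.toList)
  let good_lens : PySem.Set Nat := PySem.Set.ofList (header_lines.map (fun h => h.toList.length))
  let buckets : PySem.Dict Nat (List (Int × List Char)) :=
    (PySem.List.enumerate lines).foldl
      (fun d p => if PySem.Set.contains headers p.2 then d
                  else d.modify p.2.length [] (fun g => g ++ [p])) PySem.Dict.empty
  let start : Int :=
    if invert then -1
    else ((PySem.List.enumerate lines).find? (fun p => PySem.Set.contains headers p.2)).elim
           ((lines.length : Int)) (fun p => p.1)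
  let picked : List (Int × List Char) :=
    buckets.items.foldl
      (fun acc q => if PySem.Set.contains good_lens q.1 != invert
                    then acc ++ q.2.filter (fun p => decide (start < p.1)) else acc) []
  (PySem.List.sorted picked (fun p => p.1)).map (fun p => String.mk p.2)

-- ===== PRECONDITION & SPEC =====
def Spec_filter_to_result_lines (header_lines : List String) (raw_data : String) (invert : Bool) (out : List String) : Prop := out = filter_to_result_lines_alt header_lines raw_data invert
instance (header_lines : List String) (raw_data : String) (invert : Bool) (out : List String) : Decidable (Spec_filter_to_result_lines header_lines raw_data invert out) := by unfold Spec_filter_to_result_lines; infer_instance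

-- ===== CLAIM (what is proved, stated in full; the proofs are below) =====
def Claim_equal_filter_to_result_lines : Prop := ∀ (header_lines : List String) (raw_data : String) (invert : Bool), Dom_filter_to_result_lines header_lines raw_data invert → Spec_filter_to_result_lines header_lines raw_data invert (filter_to_result_lines header_lines raw_data invert)

-- ===== LEMMAS AND PROOFS =====

-- A's loop step, abstracted over the two membership predicates
def pvStepA (p q : List Char → Bool) (invert : Bool)
    (st : List (List Char) × Bool) (line : List Char) : List (List Char) × Bool :=
  if p line then (st.1, true)
  else if !invert && !st.2 then st
  else if q line == invert then st
  else (st.1 ++ [line], st.2)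

lemma foldl_stepA_invert (p q : List Char → Bool) :
    ∀ (ls : List (List Char)) (acc : List (List Char)) (b : Bool),
      (ls.foldl (pvStepA p q true) (acc, b)).1
        = acc ++ ls.filter (fun l => !p l && !q l) := by
  intro ls
  induction ls with
  | nil => intro acc b; simp
  | cons l ls ih =>
    intro acc b
    by_cases hp : p l
    · simp [List.foldl_cons, pvStepA, hp, ih]
    · by_cases hq : q l
      · simp [List.foldl_cons, pvStepA, hp, hq, ih]
      · simp [List.foldl_cons, pvStepA, hp, hq, ih]

lemma foldl_stepA_past (p q : List Char → Bool) :
    ∀ (ls : List (List Char)) (acc : List (List Char)),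
      (ls.foldl (pvStepA p q false) (acc, true)).1
        = acc ++ ls.filter (fun l => !p l && q l) := by
  intro ls
  induction ls with
  | nil => intro acc; simp
  | cons l ls ih =>
    intro acc
    by_cases hp : p l
    · simp [List.foldl_cons, pvStepA, hp, ih]
    · by_cases hq : q l
      · simp [List.foldl_cons, pvStepA, hp, hq, ih]
      · simp [List.foldl_cons, pvStepA, hp, hq, ih]

lemma foldl_stepA_before (p q : List Char → Bool) :
    ∀ (ls : List (List Char)) (acc : List (List Char)),
      (ls.foldl (pvStepA p q false) (acc, false)).1
        = acc ++ (ls.drop (ls.findIdx p)).filter (fun l => !p l && q l) := by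
  intro ls
  induction ls with
  | nil => intro acc; simp
  | cons l ls ih =>
    intro acc
    by_cases hp : p l
    · simp [List.foldl_cons, pvStepA, hp, List.findIdx_cons,
            foldl_stepA_past p q ls acc]
    · simp [List.foldl_cons, pvStepA, hp, List.findIdx_cons, ih]

lemma any_beq_eq_contains {α : Type} [BEq α] [LawfulBEq α] (xs : List α) (x : α) :
    xs.any (fun h => x == h) = xs.contains x := by
  rw [Bool.eq_iff_iff]
  simp only [List.contains_iff_mem, List.any_eq_true, beq_iff_eq]
  constructor
  · rintro ⟨a, ha, rfl⟩; exact ha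
  · intro h; exact ⟨x, h, rfl⟩

lemma set_contains_ofList {α : Type} [BEq α] [LawfulBEq α] (xs : List α) (x : α) :
    PySem.Set.contains (PySem.Set.ofList xs) x = xs.contains x := by
  rw [Bool.eq_iff_iff]
  simp only [PySem.Set.contains, List.contains_iff_mem]
  exact PySem.Set.mem_ofList xs x

-- dropping the lines at or before the first p-hit keeps the (!p)-filter unchanged
lemma drop_findIdx_filter {α : Type} (xs : List α) (p g : α → Bool) :
    (xs.drop (xs.findIdx p)).filter (fun l => !p l && g l)
      = (xs.drop (xs.findIdx p + 1)).filter (fun l => !p l && g l) := by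
  by_cases h : xs.findIdx p < xs.length
  · rw [List.drop_eq_getElem_cons h, List.filter_cons]
    have : p (xs[xs.findIdx p]) = true := List.findIdx_getElem (w := h)
    simp [this]
  · have hl : xs.length ≤ xs.findIdx p := Nat.le_of_not_lt h
    rw [List.drop_eq_nil_of_le hl, List.drop_eq_nil_of_le (Nat.le_succ_of_le hl)]

-- every index produced by enumerate is at least the start value
lemma mem_enumerate_le {α : Type} :
    ∀ (xs : List α) (n : Int) (r : Int × α), r ∈ PySem.List.enumerate xs n → n ≤ r.1 := by
  intro xs
  induction xs with
  | nil => intro n r h; simp [PySem.List.enumerate] at h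
  | cons x t ih =>
    intro n r h
    simp only [PySem.List.enumerate, List.mem_cons] at h
    rcases h with h | h
    · simp [h]
    · have := ih (n + 1) r h; omega

-- enumerate's indices are strictly increasing
lemma enumerate_pairwise {α : Type} :
    ∀ (xs : List α) (n : Int),
      (PySem.List.enumerate xs n).Pairwise (fun a b => a.1 < b.1) := by
  intro xs
  induction xs with
  | nil => intro n; simp [PySem.List.enumerate]
  | cons x t ih =>
    intro n
    refine List.Pairwise.cons ?_ (ih (n + 1))
    intro r hr
    have := mem_enumerate_le t (n + 1) r hr
    simp; omega

-- the first-header search via enumerate/find? computes findIdx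
lemma enumerate_find_elim {α : Type} (f : α → Bool) :
    ∀ (xs : List α) (n : Int),
      ((PySem.List.enumerate xs n).find? (fun r => f r.2)).elim (n + (xs.length : Int)) (fun r => r.1)
        = n + (xs.findIdx f : Int) := by
  intro xs
  induction xs with
  | nil => intro n; simp [PySem.List.enumerate]
  | cons x t ih =>
    intro n
    by_cases hf : f x
    · simp [PySem.List.enumerate, List.find?_cons, hf, List.findIdx_cons]
    · simp only [PySem.List.enumerate]
      have hfind : List.find? (fun r : Int × α => f r.2) ((n, x) :: PySem.List.enumerate t (n + 1))
          = List.find? (fun r : Int × α => f r.2) (PySem.List.enumerate t (n + 1)) :=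
        List.find?_cons_of_neg (by simp [hf])
      rw [hfind, List.findIdx_cons]
      simp only [hf, cond_false, List.length_cons]
      have h := ih (n + 1)
      have harith : n + ((t.length + 1 : Nat) : Int) = (n + 1) + (t.length : Int) := by
        push_cast; ring
      rw [harith, h]
      push_cast; ring

-- filtering enumerate by "index > m" and projecting is a drop-then-filter
lemma enumerate_filter_gt {α : Type} (f : α → Bool) :
    ∀ (xs : List α) (n m : Int),
      (((PySem.List.enumerate xs n).filter (fun r => f r.2 && decide (m < r.1))).map (fun r => r.2))
        = (xs.drop (m + 1 - n).toNat).filter f := by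
  intro xs
  induction xs with
  | nil => intro n m; simp [PySem.List.enumerate]
  | cons x t ih =>
    intro n m
    by_cases hmn : m < n
    · have h0 : (m + 1 - n).toNat = 0 := by omega
      have h1 : (m - n).toNat = 0 := by omega
      rw [h0]
      simp only [PySem.List.enumerate, List.filter_cons]
      rw [List.drop_zero, List.filter_cons]
      by_cases hf : f x
      · simp [hf, hmn, ih (n + 1) m, h1]
      · simp [hf, hmn, ih (n + 1) m, h1]
    · have h0 : (m + 1 - n).toNat = (m + 1 - (n + 1)).toNat + 1 := by omega
      simp only [PySem.List.enumerate, List.filter_cons, hmn, decide_false, Bool.and_false]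
      rw [h0, List.drop_succ_cons]
      simpa using ih (n + 1) m

-- a disjoint boolean union of filters splits into a permutation of the two filters
lemma filter_or_perm {α : Type} (p q : α → Bool) (hdisj : ∀ x, ¬(p x = true ∧ q x = true)) :
    ∀ (xs : List α), (xs.filter (fun x => p x || q x)).Perm (xs.filter p ++ xs.filter q) := by
  intro xs
  induction xs with
  | nil => simp
  | cons x t ih =>
    by_cases hp : p x
    · have hq : q x = false := by
        cases hqq : q x
        · rfl
        · exact absurd ⟨hp, hqq⟩ (hdisj x)
      simpa [List.filter_cons, hp, hq] using ih.cons x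
    · by_cases hq : q x
      · have h1 : (x :: (t.filter p ++ t.filter q)).Perm (t.filter p ++ x :: t.filter q) :=
          List.perm_middle.symm
        simpa [List.filter_cons, hp, hq] using (ih.cons x).trans h1
      · simpa [List.filter_cons, hp, hq] using ih

-- concatenating per-key filters over distinct keys is a permutation of the membership filter
lemma flatMap_filter_key_perm {α κ : Type} [DecidableEq κ] (E : List α) (key : α → κ) (r : α → Bool) :
    ∀ (ks : List κ), ks.Nodup →
      (ks.flatMap (fun k => E.filter (fun a => decide (key a = k) && r a))).Perm
        (E.filter (fun a => decide (key a ∈ ks) && r a)) := by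
  intro ks
  induction ks with
  | nil => intro _; simp
  | cons k t ih =>
    intro hnd
    rcases List.nodup_cons.mp hnd with ⟨hk, hnd'⟩
    have hsplit :
        (E.filter (fun a => decide (key a ∈ k :: t) && r a)).Perm
          (E.filter (fun a => decide (key a = k) && r a)
            ++ E.filter (fun a => decide (key a ∈ t) && r a)) := by
      have := filter_or_perm (fun a => decide (key a = k) && r a)
        (fun a => decide (key a ∈ t) && r a)
        (by
          intro a hcon
          rcases hcon with ⟨h1, h2⟩
          simp only [Bool.and_eq_true, decide_eq_true_eq] at h1 h2
          exact hk (h1.1 ▸ h2.1)) E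
      refine List.Perm.trans ?_ this
      have he : (fun a => decide (key a ∈ k :: t) && r a)
          = (fun a => (decide (key a = k) && r a) || (decide (key a ∈ t) && r a)) := by
        funext a
        by_cases h1 : key a = k <;> by_cases h2 : key a ∈ t <;> simp [h1, h2]
      rw [he]
    have : ((k :: t).flatMap (fun k => E.filter (fun a => decide (key a = k) && r a))).Perm
        (E.filter (fun a => decide (key a = k) && r a)
          ++ E.filter (fun a => decide (key a ∈ t) && r a)) := by
      simpa [List.flatMap_cons] using (ih hnd').append_left (E.filter (fun a => decide (key a = k) && r a))
    exact this.trans hsplit.symm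

-- full characterization of B's bucket-and-sort pipeline as a drop-then-filter
lemma nat_beq_eq_decide (a c : Nat) : (a == c) = decide (a = c) := by
  by_cases h : a = c <;> simp [h]

lemma alt_pipeline (L : List (List Char)) (lines : List (List Char)) (invert : Bool) (start : Int) :
    (PySem.List.sorted
      ((((PySem.List.enumerate lines).foldl
          (fun d r => if PySem.Set.contains (PySem.Set.ofList L) r.2 then d
                      else d.modify r.2.length [] (fun g => g ++ [r]))
          PySem.Dict.empty).items).foldl
        (fun acc qq => if PySem.Set.contains (PySem.Set.ofList (L.map List.length)) qq.1 != invert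
                       then acc ++ qq.2.filter (fun r => decide (start < r.1)) else acc) [])
      (fun r => r.1)).map (fun r => String.mk r.2)
    = ((lines.drop (start + 1).toNat).filter
        (fun l => !(L.contains l) && ((L.map List.length).contains l.length != invert))).map String.mk := by
  have hstep : (fun (d : PySem.Dict Nat (List (Int × List Char))) r =>
        if PySem.Set.contains (PySem.Set.ofList L) r.2 then d
        else d.modify r.2.length [] (fun g => g ++ [r]))
      = (fun d r => if !(L.contains r.2) then d.modify r.2.length [] (fun g => g ++ [r]) else d) := by
    funext d r
    rw [set_contains_ofList]
    cases hc : L.contains r.2 <;> simp [hc]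
  rw [hstep]
  simp only [PySem.List.foldl_if_eq_foldl_filter]
  set E := (PySem.List.enumerate lines).filter (fun r => !(L.contains r.2)) with hE
  set bk := E.foldl (fun d r => d.modify r.2.length [] (fun g => g ++ [r])) PySem.Dict.empty with hbk
  have hbuck : bk = (E.map (fun r => (r.2.length, r))).foldl
      (fun d pr => d.modify pr.1 [] (fun g => g ++ [pr.2])) PySem.Dict.empty := by
    rw [hbk, List.foldl_map]
  have hkeys : bk.keys = PySem.Set.ofList (E.map (fun r => r.2.length)) := by
    rw [hbk, PySem.Dict.keys_foldl_modify_key E (fun r => r.2.length) []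
      (fun _ r => fun g => g ++ [r]) PySem.Dict.empty]
    rw [PySem.Dict.keys_empty, PySem.Set.update_nil_left]
  have hnodk : bk.keys.Nodup := by rw [hkeys]; exact PySem.Set.nodup_ofList _
  have hgetD : ∀ c, bk.getD c [] = E.filter (fun r => r.2.length == c) := by
    intro c
    rw [hbuck, PySem.Dict.getD_foldl_modify_append, PySem.Dict.getD_empty]
    rw [List.filter_map, List.map_map]
    rw [show ((fun (p : Nat × (Int × List Char)) => p.1 == c)
        ∘ (fun r : Int × List Char => (r.2.length, r)))
      = (fun r : Int × List Char => r.2.length == c) from rfl]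
    rw [show ((fun (x : Nat × (Int × List Char)) => x.2)
        ∘ (fun r : Int × List Char => (r.2.length, r)))
      = (fun r : Int × List Char => r) from rfl]
    simp
  have hitems : bk.items = (PySem.Set.ofList (E.map (fun r => r.2.length))).map
      (fun c => (c, E.filter (fun r => r.2.length == c))) := by
    rw [PySem.Dict.items_eq_map_keys bk hnodk [], hkeys]
    simp only [hgetD]
  rw [PySem.List.foldl_append_eq_flatMap, List.nil_append]
  simp only [hitems, List.filter_map, List.flatMap_map, List.filter_filter]
  rw [show ((fun (x : Nat × List (Int × List Char)) =>
        PySem.Set.contains (PySem.Set.ofList (L.map List.length)) x.1 != invert)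
        ∘ (fun c : Nat => (c, E.filter (fun r => r.2.length == c))))
      = (fun c : Nat => PySem.Set.contains (PySem.Set.ofList (L.map List.length)) c != invert)
      from rfl]
  set KS := (PySem.Set.ofList (E.map (fun r => r.2.length))).filter
      (fun c => PySem.Set.contains (PySem.Set.ofList (L.map List.length)) c != invert) with hKS
  have hKSnd : KS.Nodup := List.Nodup.filter _ (PySem.Set.nodup_ofList _)
  have hperm := flatMap_filter_key_perm E (fun r => r.2.length)
      (fun r => decide (start < r.1)) KS hKSnd
  have hmatch : ∀ k : Nat,
      (fun a : Int × List Char => decide (a.2.length = k) && decide (start < a.1))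
        = (fun a : Int × List Char => decide (start < a.1) && (a.2.length == k)) := by
    intro k; funext a; rw [Bool.and_comm, nat_beq_eq_decide]
  simp only [hmatch] at hperm
  set T := (PySem.List.enumerate lines).filter
      (fun r => (!(L.contains r.2) && ((L.map List.length).contains r.2.length != invert))
        && decide (start < r.1)) with hT
  have hPT : E.filter (fun a => decide (a.2.length ∈ KS) && decide (start < a.1)) = T := by
    rw [hE, List.filter_filter, hT]
    apply List.filter_congr
    intro r hr
    cases hc : L.contains r.2
    · have hrE : r ∈ E := by
        rw [hE]
        refine List.mem_filter.mpr ⟨hr, ?_⟩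
        simpa using hc
      have hmem : r.2.length ∈ PySem.Set.ofList (E.map (fun r => r.2.length)) := by
        rw [PySem.Set.mem_ofList]; exact List.mem_map.mpr ⟨r, hrE, rfl⟩
      have hiff : r.2.length ∈ KS ↔
          (PySem.Set.contains (PySem.Set.ofList (L.map List.length)) r.2.length != invert)
            = true := by
        rw [hKS, List.mem_filter]
        exact ⟨fun h => h.2, fun h => ⟨hmem, h⟩⟩
      have hks : decide (r.2.length ∈ KS)
          = (PySem.Set.contains (PySem.Set.ofList (L.map List.length)) r.2.length != invert) := by
        cases hb : (PySem.Set.contains (PySem.Set.ofList (L.map List.length)) r.2.length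
            != invert)
        · apply decide_eq_false
          intro hmemKS
          have hcontra := hiff.mp hmemKS
          rw [hb] at hcontra
          exact Bool.false_ne_true hcontra
        · exact decide_eq_true (hiff.mpr hb)
      rw [hks, set_contains_ofList]
      cases hql : ((L.map List.length).contains r.2.length != invert) <;>
        cases hst : decide (start < r.1) <;> simp
    · simp [hc]
  rw [hPT] at hperm
  have hpair : T.Pairwise (fun a b => a.1 < b.1) :=
    List.Pairwise.filter _ (enumerate_pairwise lines 0)
  rw [PySem.List.sorted_eq_of_perm_of_pairwise_lt _ T (fun r => r.1) hperm.symm hpair]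
  rw [show (fun r : Int × List Char => String.mk r.2)
      = (String.mk ∘ fun r : Int × List Char => r.2) from rfl, ← List.map_map, hT]
  rw [enumerate_filter_gt
      (fun l => !(L.contains l) && ((L.map List.length).contains l.length != invert)) lines 0 start]
  norm_num

-- ===== VERDICT (by name: the statement is the Claim_ definition above) =====
theorem filter_to_result_lines_spec : Claim_equal_filter_to_result_lines := by
  intro header_lines raw_data invert _
  unfold Spec_filter_to_result_lines filter_to_result_lines filter_to_result_lines_alt
  dsimp only
  have hmm : header_lines.map (fun h => h.toList.length)
      = (header_lines.map String.toList).map List.length := by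
    simp [List.map_map, Function.comp]
  rw [hmm]
  set L := header_lines.map String.toList with hL
  set lines := pvSplitKeep [] raw_data.toList with hlines
  set p : List Char → Bool := fun l => L.contains l with hp
  set q : List Char → Bool := fun l => (L.map List.length).contains l.length with hq
  have hF : (fun (st : List (List Char) × Bool) line =>
      if L.any (fun h => line == h) then (st.1, true)
      else if !invert && !st.2 then st
      else if ((L.map List.length).any (fun g => line.length == g)) == invert then st
      else (st.1 ++ [line], st.2)) = pvStepA p q invert := by
    funext st line
    simp only [pvStepA, any_beq_eq_contains, hp, hq]
  rw [hF]
  rw [alt_pipeline L lines invert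
      (if invert then -1
       else ((PySem.List.enumerate lines).find?
          (fun r => PySem.Set.contains (PySem.Set.ofList L) r.2)).elim
          ((lines.length : Int)) (fun r => r.1))]
  cases invert with
  | true =>
    rw [if_pos rfl]
    rw [foldl_stepA_invert p q lines [] false, List.nil_append]
    rw [show ((-1 : Int) + 1).toNat = 0 from rfl, List.drop_zero]
    congr 1
    apply List.filter_congr
    intro l _
    simp only [hp, hq]
    cases h1 : L.contains l <;>
      cases hql : (L.map List.length).contains l.length <;> rfl
  | false =>
    rw [if_neg (by simp)]
    rw [foldl_stepA_before p q lines []]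
    have h0 : ((PySem.List.enumerate lines).find?
        (fun r => PySem.Set.contains (PySem.Set.ofList L) r.2)).elim
        ((lines.length : Int)) (fun r => r.1)
        = ((lines.findIdx (fun l => PySem.Set.contains (PySem.Set.ofList L) l) : Nat) : Int) := by
      have := enumerate_find_elim
        (fun l => PySem.Set.contains (PySem.Set.ofList L) l) lines 0
      simpa using this
    rw [h0]
    have hfid : (lines.findIdx (fun l => PySem.Set.contains (PySem.Set.ofList L) l))
        = lines.findIdx p := by
      congr 1; funext l; rw [set_contains_ofList, hp]
    rw [hfid]
    have htn : (((lines.findIdx p : Nat) : Int) + 1).toNat = lines.findIdx p + 1 := by omega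
    rw [htn, List.nil_append, drop_findIdx_filter lines p q]
    congr 1
    apply List.filter_congr
    intro l _
    simp only [hp, hq]
    cases h1 : L.contains l <;>
      cases hql : (L.map List.length).contains l.length <;> rfl
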